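-- pv_equiv track=rewrite | github.com/thehalleyyoung/halley-labs | mutation-contract-synth/benchmarks/sota_benchmark.py | _conditions_match
-- ===== SOURCE A (Python) =====
-- def _conditions_match(cond1: str, cond2: str) -> bool:
--     """Check if two conditions are semantically equivalent"""
--     # Normalize conditions
--     c1 = cond1.lower().replace(" ", "")
--     c2 = cond2.lower().replace(" ", "")
--
--     # Direct match
--     if c1 == c2:
--         return True
--
--     # Check for equivalent conditions
--     equivalents = [
--         ("result>0", "result>=1"),
--         ("len(result)==len(arr)", "len(result)==len(input)"),
--         ("result>=0", "result>=-1"),  # Partial match for similar bounds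
--         ("a>0", "a>=1"),
--         ("b>0", "b>=1"),
--     ]
--
--     for eq1, eq2 in equivalents:
--         if (c1 == eq1 and c2 == eq2) or (c1 == eq2 and c2 == eq1):
--             return True
--
--     return False
-- ===== SOURCE B (Python) =====
-- # Canonical-form approach: each condition is independently rewritten to the
-- # canonical representative of its synonym class, then the representatives are compared.
-- _CANON = {
--     "result>=1": "result>0",
--     "len(result)==len(input)": "len(result)==len(arr)",
--     "result>=-1": "result>=0",
--     "a>=1": "a>0",
--     "b>=1": "b>0",
-- }
--
--
-- def _conditions_match(cond1: str, cond2: str) -> bool: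
--     """Check if two conditions are semantically equivalent"""
--     def canon(cond: str) -> str:
--         c = cond.lower().replace(" ", "")
--         return _CANON.get(c, c)
--
--     return canon(cond1) == canon(cond2)
-- ===== Notes on version B (the rewrite author's own statement) =====
-- stated objective: simpler
-- what changed: Replaces A's scan over a table of equivalent pairs (tested in both orders) by canonicalizing each condition independently to its class representative and comparing the two canonical forms once; exact because the five synonym classes are disjoint.
import Mathlib
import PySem

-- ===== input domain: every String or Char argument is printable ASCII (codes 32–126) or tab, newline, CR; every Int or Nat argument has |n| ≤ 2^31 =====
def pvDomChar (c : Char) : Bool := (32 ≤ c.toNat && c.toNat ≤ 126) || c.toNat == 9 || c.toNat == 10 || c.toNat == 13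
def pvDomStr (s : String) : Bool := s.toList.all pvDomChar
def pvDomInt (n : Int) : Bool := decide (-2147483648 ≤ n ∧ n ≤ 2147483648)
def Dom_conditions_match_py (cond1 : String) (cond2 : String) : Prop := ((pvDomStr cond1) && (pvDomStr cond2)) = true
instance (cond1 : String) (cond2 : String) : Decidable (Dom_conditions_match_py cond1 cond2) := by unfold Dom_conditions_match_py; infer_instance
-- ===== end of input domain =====

-- B replaces A's scan over a table of equivalent pairs (tested in both orders) by canonicalizing
-- each condition independently to its class representative and comparing once; objective: simpler.

-- ===== PORT A =====
-- the hard-coded list of equivalent condition pairs from A's body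
def pvEquivalentsA : List (String × String) :=
  [ ("result>0", "result>=1"),
    ("len(result)==len(arr)", "len(result)==len(input)"),
    ("result>=0", "result>=-1"),
    ("a>0", "a>=1"),
    ("b>0", "b>=1") ]

-- A's 'for eq1, eq2 in equivalents' loop with its early 'return True'
def pvLoopA (c1 c2 : String) : List (String × String) → Bool
  | [] => false
  | (eq1, eq2) :: rest =>
    if (c1 == eq1 && c2 == eq2) || (c1 == eq2 && c2 == eq1) then true
    else pvLoopA c1 c2 rest

def conditions_match_py (cond1 : String) (cond2 : String) : Bool :=
  let c1 := PySem.Str.replace (PySem.Str.lower cond1) " " ""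
  let c2 := PySem.Str.replace (PySem.Str.lower cond2) " " ""
  if c1 == c2 then true
  else pvLoopA c1 c2 pvEquivalentsA

-- ===== PORT B =====
-- Source B's module-level _CANON dict: synonym -> canonical representative
def pvCanonDict : PySem.Dict String String := PySem.Dict.mk
  [ ("result>=1", "result>0"),
    ("len(result)==len(input)", "len(result)==len(arr)"),
    ("result>=-1", "result>=0"),
    ("a>=1", "a>0"),
    ("b>=1", "b>0") ]

-- Source B's local 'canon': normalize, then _CANON.get(c, c)
def pvCanon (cond : String) : String :=
  let c := PySem.Str.replace (PySem.Str.lower cond) " " ""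
  PySem.Dict.getD pvCanonDict c c

def conditions_match_py_alt (cond1 : String) (cond2 : String) : Bool :=
  pvCanon cond1 == pvCanon cond2

-- ===== PRECONDITION & SPEC =====
def Spec_conditions_match_py (cond1 : String) (cond2 : String) (out : Bool) : Prop := out = conditions_match_py_alt cond1 cond2
instance (cond1 : String) (cond2 : String) (out : Bool) : Decidable (Spec_conditions_match_py cond1 cond2 out) := by unfold Spec_conditions_match_py; infer_instance

-- ===== CLAIM (what is proved, stated in full; the proofs are below) =====
def Claim_equal_conditions_match_py : Prop := ∀ (cond1 : String) (cond2 : String), Dom_conditions_match_py cond1 cond2 → Spec_conditions_match_py cond1 cond2 (conditions_match_py cond1 cond2)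

-- ===== LEMMAS AND PROOFS =====

-- the lookup into the literal _CANON dict, as a chain of ifs
theorem pv_canon_lookup (x : String) :
    PySem.Dict.getD pvCanonDict x x =
      if x == "result>=1" then "result>0"
      else if x == "len(result)==len(input)" then "len(result)==len(arr)"
      else if x == "result>=-1" then "result>=0"
      else if x == "a>=1" then "a>0"
      else if x == "b>=1" then "b>0"
      else x := by
  simp only [pvCanonDict, PySem.Dict.getD_eq_get?_getD, PySem.Dict.get?_mk_cons]
  split_ifs <;> simp_all [beq_iff_eq, PySem.Dict.get?]

set_option maxHeartbeats 2000000 in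
-- the core pointwise equality, stated on the already-normalized strings
theorem pv_main (c1 c2 : String) :
    (if c1 == c2 then true else pvLoopA c1 c2 pvEquivalentsA)
      = (PySem.Dict.getD pvCanonDict c1 c1 == PySem.Dict.getD pvCanonDict c2 c2) := by
  rw [pv_canon_lookup c1, pv_canon_lookup c2]
  by_cases h : c1 = c2
  · simp [h]
  · have hne : (c1 == c2) = false := by simp [h]
    rw [hne]
    simp only [Bool.false_eq_true, if_false, pvLoopA, pvEquivalentsA]
    split_ifs <;> simp_all [beq_iff_eq] <;> (intro he; simp_all)

-- ===== VERDICT (by name: the statement is the Claim_ definition above) =====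
theorem conditions_match_py_spec : Claim_equal_conditions_match_py := by
  intro cond1 cond2 _
  unfold Spec_conditions_match_py conditions_match_py conditions_match_py_alt pvCanon
  exact pv_main _ _
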